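-- pv_equiv track=rewrite | github.com/UHSchollar-Org/sri_project | source/text_processing.py | remove_empty_parenthesis
-- ===== SOURCE A (Python) =====
-- from typing import List
--
-- def remove_empty_parenthesis(list):
--     invalid_positions : List[int] = []
--     new_list = []
--     for i in range(len(list)):
--         if list[i] == '(' and list[i+1] == ')':
--             invalid_positions.append(i)
--             invalid_positions.append(i+1)
--
--     for i in range(len(list)):
--         if i not in invalid_positions:
--             new_list.append(list[i])
--     return new_list
-- ===== SOURCE B (Python) =====
-- def remove_empty_parenthesis(list):
--     new_list = []
--     i = 0
--     n = len(list)
--     while i < n: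
--         if list[i] == '(' and list[i + 1] == ')':
--             i += 2
--         else:
--             new_list.append(list[i])
--             i += 1
--     return new_list
-- ===== Notes on version B (the rewrite author's own statement) =====
-- stated objective: simpler
-- what changed: Replaced A's two passes (collect invalid indices, then filter each index by list membership) with one forward pass that skips two positions on each '(' ')' pair and appends otherwise.
import Mathlib
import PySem

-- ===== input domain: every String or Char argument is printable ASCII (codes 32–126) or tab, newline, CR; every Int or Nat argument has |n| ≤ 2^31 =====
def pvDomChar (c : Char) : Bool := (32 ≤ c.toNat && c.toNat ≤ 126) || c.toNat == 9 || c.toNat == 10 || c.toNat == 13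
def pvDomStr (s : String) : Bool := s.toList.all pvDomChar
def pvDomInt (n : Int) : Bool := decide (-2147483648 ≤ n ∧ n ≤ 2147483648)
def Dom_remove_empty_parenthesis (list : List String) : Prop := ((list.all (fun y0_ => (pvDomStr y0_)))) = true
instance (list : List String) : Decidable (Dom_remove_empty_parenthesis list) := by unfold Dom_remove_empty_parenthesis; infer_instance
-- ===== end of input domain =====

-- B replaces A's two passes (collect invalid indices, then filter by membership) with one
-- forward pass that skips the two tokens of each '(' ')' pair; same return value on Pre_.

-- ===== PORT A =====
-- pair test at index j: list[j] == '(' and list[j+1] == ')'.  Python's list[j+1] raises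
-- IndexError when j is the last index and list[j] == '(' — exactly the inputs Pre_ excludes;
-- there getD returns "" (≠ ")"), which is only reached outside Pre_.
def condA (l : List String) (j : Nat) : Bool := l.getD j "" == "(" && l.getD (j+1) "" == ")"

-- first loop of A: collect the invalid positions i, i+1
def aInvalid (l : List String) : List Nat :=
  (List.range l.length).foldl (fun acc i => if condA l i then acc ++ [i, i+1] else acc) []

def remove_empty_parenthesis (list : List String) : List String :=
  let invalid := aInvalid list
  (List.range list.length).foldl
    (fun acc i => if i ∈ invalid then acc else acc ++ [list.getD i ""]) []

-- ===== PORT B =====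
-- B's single while-loop pass: at the current position, on '(' followed by ')' advance by 2,
-- otherwise emit the token and advance by 1.
def remove_empty_parenthesis_alt : List String → List String
  | [] => []
  | x :: rest =>
    if x = "(" ∧ rest.head? = some ")" then remove_empty_parenthesis_alt rest.tail
    else x :: remove_empty_parenthesis_alt rest
  termination_by l => l.length
  decreasing_by
    all_goals (simp [List.length_tail]; try omega)

-- ===== PRECONDITION & SPEC =====
-- Pre_ excludes exactly the inputs where the Python A raises IndexError (last token '(',
-- making it evaluate list[len(list)]); B raises there too.
def Pre_remove_empty_parenthesis (list : List String) : Prop := list.getLast? ≠ some "("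
instance (list : List String) : Decidable (Pre_remove_empty_parenthesis list) := by
  unfold Pre_remove_empty_parenthesis; infer_instance

def pvWitness_remove_empty_parenthesis : List String := ["(", ")", "a"]

def Spec_remove_empty_parenthesis (list : List String) (out : List String) : Prop := out = remove_empty_parenthesis_alt list
instance (list : List String) (out : List String) : Decidable (Spec_remove_empty_parenthesis list out) := by unfold Spec_remove_empty_parenthesis; infer_instance

-- ===== CLAIM (what is proved, stated in full; the proofs are below) =====
def Claim_equal_remove_empty_parenthesis : Prop := ∀ (list : List String), Dom_remove_empty_parenthesis list → Pre_remove_empty_parenthesis list → Spec_remove_empty_parenthesis list (remove_empty_parenthesis list)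

-- ===== LEMMAS AND PROOFS =====

lemma mem_foldl_inv (c : Nat → Bool) (is : List Nat) (acc : List Nat) (k : Nat) :
    k ∈ is.foldl (fun a i => if c i then a ++ [i, i+1] else a) acc ↔
      k ∈ acc ∨ ∃ j ∈ is, c j ∧ (k = j ∨ k = j + 1) := by
  induction is generalizing acc with
  | nil => simp
  | cons i is ih =>
    simp only [List.foldl_cons, ih]
    by_cases h : c i = true <;> simp [h, or_assoc]

lemma mem_aInvalid (l : List String) (k : Nat) :
    k ∈ aInvalid l ↔ ∃ j, j < l.length ∧ condA l j ∧ (k = j ∨ k = j + 1) := by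
  simp [aInvalid, mem_foldl_inv]

lemma foldl_keep (inv : List Nat) (g : Nat → String) (is : List Nat) (acc : List String) :
    is.foldl (fun a i => if i ∈ inv then a else a ++ [g i]) acc =
      acc ++ (is.filter (fun i => decide (i ∉ inv))).map g := by
  induction is generalizing acc with
  | nil => simp
  | cons i is ih =>
    by_cases h : i ∈ inv <;> simp [h, ih]

lemma A_eq (l : List String) :
    remove_empty_parenthesis l =
      ((List.range l.length).filter (fun i => decide (i ∉ aInvalid l))).map
        (fun i => l.getD i "") := by
  simp [remove_empty_parenthesis, foldl_keep]

lemma condA_cons_succ (x : String) (l : List String) (j : Nat) :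
    condA (x :: l) (j + 1) = condA l j := by
  simp [condA]

lemma range_add_two (n : Nat) :
    List.range (n + 2) = 0 :: 1 :: (List.range n).map (fun i => i + 2) := by
  rw [List.range_succ_eq_map, List.range_succ_eq_map]
  simp [Function.comp]

-- the pair case: A removes exactly positions 0 and 1 and recurses on the rest
lemma A_pair (rest : List String) :
    remove_empty_parenthesis ("(" :: ")" :: rest) = remove_empty_parenthesis rest := by
  have hshift : ∀ k, k + 2 ∈ aInvalid ("(" :: ")" :: rest) ↔ k ∈ aInvalid rest := by
    intro k
    rw [mem_aInvalid, mem_aInvalid]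
    constructor
    · rintro ⟨j, hj, hc, hk⟩
      match j with
      | 0 => omega
      | 1 => simp [condA] at hc
      | j + 2 =>
        refine ⟨j, by simpa using hj, ?_, by omega⟩
        rwa [condA_cons_succ, condA_cons_succ] at hc
    · rintro ⟨j, hj, hc, hk⟩
      exact ⟨j + 2, by simpa using hj, by rwa [condA_cons_succ, condA_cons_succ], by omega⟩
  have h0 : (0 : Nat) ∈ aInvalid ("(" :: ")" :: rest) := by
    rw [mem_aInvalid]; exact ⟨0, by simp, by simp [condA], by omega⟩
  have h1 : (1 : Nat) ∈ aInvalid ("(" :: ")" :: rest) := by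
    rw [mem_aInvalid]; exact ⟨0, by simp, by simp [condA], by omega⟩
  rw [A_eq, A_eq]
  rw [show ("(" :: ")" :: rest : List String).length = rest.length + 2 by simp]
  rw [range_add_two]
  rw [List.filter_cons_of_neg (by simp [h0]), List.filter_cons_of_neg (by simp [h1])]
  rw [List.filter_map, List.map_map]
  rw [show ((fun i => decide (i ∉ aInvalid ("(" :: ")" :: rest))) ∘ (fun i => i + 2))
        = (fun i => decide (i ∉ aInvalid rest)) from
      funext fun i => by simp [Function.comp, hshift]]
  rw [show ((fun i => ("(" :: ")" :: rest : List String).getD i "") ∘ (fun i => i + 2))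
        = (fun i => rest.getD i "") from
      funext fun i => by simp [Function.comp, List.getD]]

-- the non-pair case: position 0 is kept and A recurses on the tail
lemma A_cons (x : String) (rest : List String) (h : condA (x :: rest) 0 = false) :
    remove_empty_parenthesis (x :: rest) = x :: remove_empty_parenthesis rest := by
  have hshift : ∀ k, k + 1 ∈ aInvalid (x :: rest) ↔ k ∈ aInvalid rest := by
    intro k
    rw [mem_aInvalid, mem_aInvalid]
    constructor
    · rintro ⟨j, hj, hc, hk⟩
      match j with
      | 0 => rw [h] at hc; exact absurd hc (by simp)
      | j + 1 =>
        refine ⟨j, by simpa using hj, ?_, by omega⟩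
        rwa [condA_cons_succ] at hc
    · rintro ⟨j, hj, hc, hk⟩
      exact ⟨j + 1, by simpa using hj, by rwa [condA_cons_succ], by omega⟩
  have h0 : (0 : Nat) ∉ aInvalid (x :: rest) := by
    rw [mem_aInvalid]
    rintro ⟨j, hj, hc, hk⟩
    match j, hk with
    | 0, _ => rw [h] at hc; exact absurd hc (by simp)
  rw [A_eq, A_eq]
  rw [show (x :: rest : List String).length = rest.length + 1 by simp]
  rw [List.range_succ_eq_map]
  rw [List.filter_cons_of_pos (by simp [h0]), List.filter_map]
  simp only [List.map_cons, List.map_map]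
  rw [show ((fun i => decide (i ∉ aInvalid (x :: rest))) ∘ Nat.succ)
        = (fun i => decide (i ∉ aInvalid rest)) from
      funext fun i => by simpa [Function.comp, Nat.succ_eq_add_one] using
        (by simp [hshift] : decide (i + 1 ∉ aInvalid (x :: rest)) = decide (i ∉ aInvalid rest))]
  rw [show ((fun i => (x :: rest : List String).getD i "") ∘ Nat.succ)
        = (fun i => rest.getD i "") from
      funext fun i => by simp [Function.comp, List.getD]]
  simp [List.getD]

theorem A_eq_B : ∀ (l : List String),
    remove_empty_parenthesis l = remove_empty_parenthesis_alt l
  | [] => by simp [remove_empty_parenthesis, aInvalid, remove_empty_parenthesis_alt]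
  | x :: rest => by
    rw [remove_empty_parenthesis_alt]
    by_cases h : x = "(" ∧ rest.head? = some ")"
    · obtain ⟨hx, hh⟩ := h
      subst hx
      rcases rest with _ | ⟨y, rest'⟩
      · simp at hh
      · simp only [List.head?_cons, Option.some.injEq] at hh
        subst hh
        rw [if_pos ⟨rfl, rfl⟩, List.tail_cons, A_pair]
        exact A_eq_B rest'
    · rw [if_neg h, ← A_eq_B rest]
      apply A_cons
      simp only [condA, Bool.and_eq_false_iff, beq_eq_false_iff_ne]
      by_cases hx : x = "("
      · subst hx
        right
        rcases rest with _ | ⟨y, rest'⟩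
        · simp [List.getD]
        · intro hy
          simp only [List.getD_cons_succ, List.getD_cons_zero] at hy
          exact h ⟨rfl, by simp [hy]⟩
      · left
        simpa [List.getD] using hx
  termination_by l => l.length
  decreasing_by
    all_goals simp

-- ===== VERDICT (by name: the statement is the Claim_ definition above) =====
theorem remove_empty_parenthesis_spec : Claim_equal_remove_empty_parenthesis := by
  intro l _ _
  unfold Spec_remove_empty_parenthesis
  exact A_eq_B l
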